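-- pv_equiv track=rewrite | github.com/Judge0609/lab_1 | hello.py | calculate_grundy
-- ===== SOURCE A (Python) =====
-- def calculate_grundy(n, k, board):
--     # Ініціалізація масиву гранді-чисел
--     grundy = [0] * (n + 1)
--
--     # Обчислення гранді-чисел
--     for i in range(1, n + 1):
--         mex = set()
--         for j in range(max(0, i - k), i):
--             mex.add(grundy[j])
--         grundy[i] = calculate_mex(mex)
--
--     # Визначення гранді-числа для початкової позиції
--     result = 0
--     for i in range(n):
--         if board[i] == 'O':
--             result ^= grundy[i + 1]
--
--     return result
--
-- def calculate_mex(s):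
--     mex = 0
--     while mex in s:
--         mex += 1
--     return mex
-- ===== SOURCE B (Python) =====
-- def calculate_grundy(n, k, board):
--     # Closed form: for k >= 1 the Grundy number of pile i is i % (k+1);
--     # for k <= 0 no move exists and every Grundy number is 0.
--     if k <= 0:
--         return 0
--     m = k + 1
--     result = 0
--     for i in range(n):
--         if board[i] == 'O':
--             result ^= (i + 1) % m
--     return result
-- ===== Notes on version B (the rewrite author's own statement) =====
-- stated objective: faster
-- what changed: Replaces the O(n*k) dynamic-programming table with mex-of-a-set computations by the closed form grundy[i] = i % (k+1) (0 when k <= 0), leaving a single O(n) XOR pass over the board.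
import Mathlib
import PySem

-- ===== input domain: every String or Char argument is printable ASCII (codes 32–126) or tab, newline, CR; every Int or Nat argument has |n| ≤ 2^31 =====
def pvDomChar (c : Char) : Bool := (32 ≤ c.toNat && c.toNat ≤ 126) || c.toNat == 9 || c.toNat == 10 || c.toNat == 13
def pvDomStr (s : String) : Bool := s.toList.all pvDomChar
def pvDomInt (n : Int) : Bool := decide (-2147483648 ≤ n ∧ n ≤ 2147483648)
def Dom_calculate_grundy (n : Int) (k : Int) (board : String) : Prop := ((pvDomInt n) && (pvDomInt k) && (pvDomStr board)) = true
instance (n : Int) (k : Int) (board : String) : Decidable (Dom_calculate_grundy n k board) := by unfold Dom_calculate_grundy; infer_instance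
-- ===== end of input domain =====

-- B replaces A's O(n*k) mex/DP table by the closed form grundy[i] = i % (k+1) (0 when k ≤ 0) in a single XOR pass (objective: faster, asymptotic).


-- ===== PORT A =====
-- 'while mex in s: mex += 1' as fuel recursion; fuel s.length + 1 always suffices
-- (s holds s.length distinct values, so some value in 0..s.length is missing).
def pvMexLoop : Nat → PySem.Set Int → Int → Int
  | 0, _, mex => mex
  | fuel + 1, s, mex => if PySem.Set.contains s mex then pvMexLoop fuel s (mex + 1) else mex

def calculate_mex (s : PySem.Set Int) : Int := pvMexLoop (s.length + 1) s 0

def calculate_grundy (n : Int) (k : Int) (board : String) : Int :=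
  let grundy0 : List Int := List.replicate (n + 1).toNat 0
  let grundy := (PySem.List.pyRange 1 (n + 1) 1).foldl
    (fun g i =>
      let mexS := (PySem.List.pyRange (max 0 (i - k)) i 1).foldl
        (fun s j => PySem.Set.add s (PySem.List.pyGetD g j 0)) PySem.Set.empty
      PySem.List.pySetD g i (calculate_mex mexS)) grundy0
  (PySem.List.pyRange 0 n 1).foldl
    (fun result i =>
      if PySem.Str.pyGet? board i = some 'O'
      then PySem.Int.bxor result (PySem.List.pyGetD grundy (i + 1) 0)
      else result) 0

-- ===== PORT B =====
def calculate_grundy_alt (n : Int) (k : Int) (board : String) : Int :=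
  if k ≤ 0 then 0
  else
    let m := k + 1
    (PySem.List.pyRange 0 n 1).foldl
      (fun result i =>
        if PySem.Str.pyGet? board i = some 'O'
        then PySem.Int.bxor result (PySem.Int.mod (i + 1) m)
        else result) 0

-- ===== PRECONDITION & SPEC =====
-- Pre_ excludes exactly n > len(board), where the Python A raises IndexError in its board scan.
def Pre_calculate_grundy (n : Int) (k : Int) (board : String) : Prop :=
  n ≤ (board.toList.length : Int)
instance (n : Int) (k : Int) (board : String) : Decidable (Pre_calculate_grundy n k board) := by
  unfold Pre_calculate_grundy; infer_instance

def pvWitness_calculate_grundy : Int × Int × String := (3, 2, "OXO")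

def Spec_calculate_grundy (n : Int) (k : Int) (board : String) (out : Int) : Prop := out = calculate_grundy_alt n k board
instance (n : Int) (k : Int) (board : String) (out : Int) : Decidable (Spec_calculate_grundy n k board out) := by unfold Spec_calculate_grundy; infer_instance

-- ===== CLAIM (what is proved, stated in full; the proofs are below) =====
def Claim_equal_calculate_grundy : Prop := ∀ (n : Int) (k : Int) (board : String), Dom_calculate_grundy n k board → Pre_calculate_grundy n k board → Spec_calculate_grundy n k board (calculate_grundy n k board)


-- ===== LEMMAS AND PROOFS =====

-- the closed-form Grundy value of pile j
def pvG (k j : Int) : Int := if k ≤ 0 then 0 else PySem.Int.mod j (k + 1)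

-- the mex loop returns the least value ≥ mex not in s, given enough fuel
theorem pvMexLoop_eq (s : PySem.Set Int) (r : Int) :
    ∀ (fuel : Nat) (mex : Int), mex ≤ r → r ∉ s →
    (∀ t, mex ≤ t → t < r → t ∈ s) → (r - mex).toNat < fuel →
    pvMexLoop fuel s mex = r := by
  intro fuel
  induction fuel with
  | zero => intro mex _ _ _ hf; omega
  | succ f ih =>
    intro mex hle hr hmem hf
    by_cases hc : mex ∈ s
    · have hne : mex ≠ r := fun h => hr (h ▸ hc)
      have : pvMexLoop (f + 1) s mex = pvMexLoop f s (mex + 1) := by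
        simp only [pvMexLoop, (PySem.Set.contains_iff s mex).mpr hc, if_true]
      rw [this]
      exact ih (mex + 1) (by omega) hr (fun t h1 h2 => hmem t (by omega) h2) (by omega)
    · have hmr : mex = r := by
        by_contra hne
        exact hc (hmem mex le_rfl (by omega))
      have : PySem.Set.contains s mex = false := by
        cases h : PySem.Set.contains s mex
        · rfl
        · exact absurd ((PySem.Set.contains_iff s mex).mp h) hc
      subst hmr
      simp only [pvMexLoop, this, Bool.false_eq_true, if_false]

-- calculate_mex of a set whose members are exactly the residues of a k-window below i
theorem pv_mex_window (k i : Int) (hk : 1 ≤ k) (hi : 1 ≤ i) (s : PySem.Set Int)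
    (hmem : ∀ y, y ∈ s ↔ ∃ j, max 0 (i - k) ≤ j ∧ j < i ∧ y = PySem.Int.mod j (k + 1)) :
    calculate_mex s = PySem.Int.mod i (k + 1) := by
  set m := k + 1 with hmdef
  have hm : (0 : Int) < m := by omega
  have hmod : ∀ a : Int, PySem.Int.mod a m = a % m := fun a => PySem.Int.mod_eq_emod_of_pos hm
  set r := i % m with hrdef
  have h0r : 0 ≤ r := Int.emod_nonneg i (by omega)
  have hrm : r < m := Int.emod_lt_of_pos i hm
  have hq : m * (i / m) + r = i := Int.mul_ediv_add_emod i m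
  have hmul0 : 0 ≤ m * (i / m) := mul_nonneg (by omega) (Int.ediv_nonneg (by omega) (by omega))
  -- r is not in s
  have hr_not : r ∉ s := by
    intro hr
    obtain ⟨j, hj1, hj2, hj3⟩ := (hmem r).mp hr
    have hjk : i - k ≤ j := le_trans (le_max_right 0 (i - k)) hj1
    have hjm : j % m = r := by rw [hmod] at hj3; omega
    have hd : m ∣ (i - j) := by
      apply Int.dvd_of_emod_eq_zero
      rw [Int.sub_emod, ← hrdef, hjm]
      simp
    have := Int.le_of_dvd (by omega) hd
    omega
  -- everything below r is in s
  have hlow : ∀ t, 0 ≤ t → t < r → t ∈ s := by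
    intro t h0t htr
    apply (hmem t).mpr
    refine ⟨m * (i / m) + t, by omega, by omega, ?_⟩
    rw [hmod]
    have : (m * (i / m) + t) = t + m * (i / m) := by ring
    rw [this, Int.add_mul_emod_self_left, Int.emod_eq_of_lt h0t (by omega)]
  -- fuel bound: the r distinct values 0..r-1 all lie in s
  have hfuel : (r - 0).toNat < s.length + 1 := by
    have hsub : ((List.range r.toNat).map (Nat.cast : Nat → Int)) ⊆ s := by
      intro x hx
      obtain ⟨a, ha, rfl⟩ := List.mem_map.mp hx
      have := List.mem_range.mp ha
      exact hlow a (by omega) (by omega)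
    have hnd2 : ((List.range r.toNat).map (Nat.cast : Nat → Int)).Nodup :=
      (List.nodup_range ).map (fun a b h => by exact_mod_cast h)
    have := (List.subperm_of_subset hnd2 hsub).length_le
    simp at this
    omega
  rw [show PySem.Int.mod i (k + 1) = r by rw [hmod]]
  exact pvMexLoop_eq s r (s.length + 1) 0 h0r hr_not (fun t h1 h2 => hlow t h1 h2) hfuel

-- the value A's inner loop computes for position i, given correct lower entries
theorem pv_step_value (k i : Int) (G : List Int) (hi : 1 ≤ i)
    (hilen : i < (G.length : Int))
    (hG : ∀ (j : Nat), (j : Int) < i → j < G.length → G[j]? = some (pvG k j)) :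
    calculate_mex ((PySem.List.pyRange (max 0 (i - k)) i 1).foldl
      (fun s j => PySem.Set.add s (PySem.List.pyGetD G j 0)) PySem.Set.empty) = pvG k i := by
  have hval : ∀ j, max 0 (i - k) ≤ j → j < i → PySem.List.pyGetD G j 0 = pvG k j := by
    intro j h1 h2
    have h0j : 0 ≤ j := le_trans (le_max_left 0 (i - k)) h1
    have hjlen : j < (G.length : Int) := lt_trans h2 hilen
    rw [PySem.List.pyGetD_eq_getElem G 0 h0j hjlen]
    have h := hG j.toNat (by omega) (by omega)
    rw [List.getElem?_eq_getElem (by omega)] at h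
    have := Option.some.inj h
    rw [this, Int.toNat_of_nonneg h0j]
  by_cases hk : k ≤ 0
  · have hnil : PySem.List.pyRange (max 0 (i - k)) i 1 = [] :=
      PySem.List.pyRange_one_eq_nil (by omega)
    rw [hnil]
    simp only [List.foldl_nil, pvG, if_pos hk]
    decide
  · rw [pv_mex_window k i (by omega) hi]
    · simp [pvG, hk]
    · intro y
      rw [PySem.Set.mem_foldl_add]
      constructor
      · rintro (h | ⟨j, hj, rfl⟩)
        · simp [PySem.Set.empty] at h
        · have := (PySem.List.mem_pyRange_one).mp hj
          exact ⟨j, this.1, this.2, by rw [hval j this.1 this.2]; simp [pvG, hk]⟩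
      · rintro ⟨j, h1, h2, rfl⟩
        refine Or.inr ⟨j, (PySem.List.mem_pyRange_one).mpr ⟨h1, h2⟩, ?_⟩
        rw [hval j h1 h2]; simp [pvG, hk]

theorem pv_grundy_inv (n k : Int) :
    ∀ (d : Nat) (i : Int) (G : List Int), 1 ≤ i → (n + 1 - i).toNat = d →
    G.length = (n + 1).toNat →
    (∀ (j : Nat), (j : Int) < i → j < G.length → G[j]? = some (pvG k j)) →
    ∀ (j : Nat), j < (n + 1).toNat →
      ((PySem.List.pyRange i (n + 1) 1).foldl
      (fun g i =>
        let mexS := (PySem.List.pyRange (max 0 (i - k)) i 1).foldl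
          (fun s j => PySem.Set.add s (PySem.List.pyGetD g j 0)) PySem.Set.empty
        PySem.List.pySetD g i (calculate_mex mexS)) G)[j]? = some (pvG k j) := by
  intro d
  induction d with
  | zero =>
    intro i G hi hd hlen hG j hj
    rw [PySem.List.pyRange_one_eq_nil (by omega)]
    simp only [List.foldl_nil]
    exact hG j (by omega) (by omega)
  | succ d ih =>
    intro i G hi hd hlen hG j hj
    have hilt : i < n + 1 := by omega
    rw [PySem.List.pyRange_one_cons hilt]
    simp only [List.foldl_cons]
    have hset : PySem.List.pySetD G i
        (calculate_mex ((PySem.List.pyRange (max 0 (i - k)) i 1).foldl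
          (fun s j => PySem.Set.add s (PySem.List.pyGetD G j 0)) PySem.Set.empty))
        = G.set i.toNat (pvG k i) := by
      rw [PySem.List.pySetD_of_nonneg (i := i) G _ (by omega),
          pv_step_value k i G hi (by omega) hG]
    rw [hset]
    apply ih (i + 1) _ (by omega) (by omega) (by simpa using hlen) _ j hj
    intro j' hj1 hj2
    simp only [List.length_set] at hj2
    rw [List.getElem?_set]
    split_ifs with h h2
    · have : (j' : Int) = i := by omega
      rw [this]
    · omega
    · exact hG j' (by omega) hj2

theorem pv_fold_len (k : Int) : ∀ (l : List Int) (G : List Int),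
    (l.foldl (fun g i =>
      let mexS := (PySem.List.pyRange (max 0 (i - k)) i 1).foldl
        (fun s j => PySem.Set.add s (PySem.List.pyGetD g j 0)) PySem.Set.empty
      PySem.List.pySetD g i (calculate_mex mexS)) G).length = G.length := by
  intro l
  induction l with
  | nil => intro G; rfl
  | cons x xs ih =>
    intro G
    simp only [List.foldl_cons]
    rw [ih]
    exact PySem.List.length_pySetD _ _ _

theorem pv_main (n k : Int) (board : String) :
    calculate_grundy n k board = calculate_grundy_alt n k board := by
  simp only [calculate_grundy, calculate_grundy_alt]
  set G' := (PySem.List.pyRange 1 (n + 1) 1).foldl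
    (fun g i =>
      let mexS := (PySem.List.pyRange (max 0 (i - k)) i 1).foldl
        (fun s j => PySem.Set.add s (PySem.List.pyGetD g j 0)) PySem.Set.empty
      PySem.List.pySetD g i (calculate_mex mexS)) (List.replicate (n + 1).toNat 0) with hG'
  have hlen : G'.length = (n + 1).toNat := by
    rw [hG', pv_fold_len k]; simp
  have hinv : ∀ (j : Nat), j < (n + 1).toNat → G'[j]? = some (pvG k j) := by
    rw [hG']
    apply pv_grundy_inv n k n.toNat 1 _ le_rfl (by omega) (by simp)
    intro j hj1 hj2
    simp only [List.length_replicate] at hj2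
    rw [List.getElem?_replicate, if_pos hj2]
    have : j = 0 := by omega
    rw [this]
    simp only [pvG]
    split_ifs with h
    · rfl
    · rw [PySem.Int.mod_eq_emod_of_pos (by omega)]; simp
  have hget : ∀ i : Int, 0 ≤ i → i < n → PySem.List.pyGetD G' (i + 1) 0 = pvG k (i + 1) := by
    intro i h0 hn
    have h1 : i + 1 < (G'.length : Int) := by omega
    rw [PySem.List.pyGetD_eq_getElem G' 0 (by omega) h1]
    have h := hinv (i + 1).toNat (by omega)
    rw [List.getElem?_eq_getElem (by omega)] at h
    have := Option.some.inj h
    rw [this, Int.toNat_of_nonneg (by omega)]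
  by_cases hk : k ≤ 0
  · rw [if_pos hk]
    rw [PySem.List.foldl_congr_mem (PySem.List.pyRange 0 n 1) _
      (fun (res : Int) (_ : Int) => res) 0
      (by
        intro acc x hx
        have hb := (PySem.List.mem_pyRange_one).mp hx
        rw [hget x hb.1 hb.2]
        simp [pvG, hk])]
    exact List.foldl_fixed _
  · rw [if_neg hk]
    apply PySem.List.foldl_congr_mem
    intro acc x hx
    have hb := (PySem.List.mem_pyRange_one).mp hx
    rw [hget x hb.1 hb.2]
    simp [pvG, hk]

-- ===== VERDICT (by name: the statement is the Claim_ definition above) =====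
theorem calculate_grundy_spec : Claim_equal_calculate_grundy := by
  intro n k board _ _
  unfold Spec_calculate_grundy
  exact pv_main n k board
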